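-- pv_equiv track=rewrite | github.com/Otavio574/Zero_Shot_FGIC_Test | scripts/generation_scripts/generate_descriptors_dclip.py | classify_feature
-- ===== SOURCE A (Python) =====
-- COLOR_WORDS = {
--     "black", "white", "brown", "grey", "gray", "red", "yellow", "orange",
--     "blue", "green", "golden", "silver", "cream", "beige", "chestnut",
--     "tan", "buff", "rufous", "rusty", "pink", "purple"
-- }
--
-- PATTERN_WORDS = {
--     "striped", "spotted", "dotted", "banded", "barred", "streaked",
--     "mottled", "speckled", "patched", "checked", "patterned", "ringed",
--     "ring", "spot", "stripe", "band"
-- }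
--
-- BODY_PART_WORDS = {
--     "head", "beak", "bill", "eye", "eyes", "eyering", "eyebrow",
--     "crown", "crest", "neck", "chest", "breast", "belly", "back",
--     "tail", "wing", "wings", "wingtips", "leg", "legs", "feet",
--     "foot", "claw", "talon", "ear", "ears", "snout", "nose", "muzzle"
-- }
--
-- SHAPE_WORDS = {
--     "slender", "broad", "narrow", "long", "short", "rounded",
--     "compact", "stocky", "tapered", "chunky", "elongated"
-- }
--
-- TEXTURE_WORDS = {
--     "smooth", "rough", "glossy", "shiny", "matte", "fluffy",
--     "shaggy", "fuzzy", "sleek", "plumage"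
-- }
--
-- def classify_feature(feat: str) -> str:
--     """
--     Classify feature into rough buckets to help ordering/diversity.
--     Buckets: color, pattern, body, shape, texture, other.
--     """
--     f = feat.lower()
--     tokens = set(f.split())
--
--     if any(c in tokens for c in COLOR_WORDS):
--         return "color"
--     if any(p in tokens for p in PATTERN_WORDS):
--         return "pattern"
--     if any(b in tokens for b in BODY_PART_WORDS):
--         return "body"
--     if any(s in tokens for s in SHAPE_WORDS):
--         return "shape"
--     if any(t in tokens for t in TEXTURE_WORDS):
--         return "texture"
--     return "other"
-- ===== SOURCE B (Python) =====
-- _BUCKETS = ("color", "pattern", "body", "shape", "texture")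
--
-- _GROUPS = (
--     "black white brown grey gray red yellow orange blue green golden silver"
--     " cream beige chestnut tan buff rufous rusty pink purple",
--     "striped spotted dotted banded barred streaked mottled speckled patched"
--     " checked patterned ringed ring spot stripe band",
--     "head beak bill eye eyes eyering eyebrow crown crest neck chest breast"
--     " belly back tail wing wings wingtips leg legs feet foot claw talon ear"
--     " ears snout nose muzzle",
--     "slender broad narrow long short rounded compact stocky tapered chunky"
--     " elongated",
--     "smooth rough glossy shiny matte fluffy shaggy fuzzy sleek plumage",
-- )
--
-- _RANK = {}
-- for _i, _ws in enumerate(_GROUPS):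
--     for _w in _ws.split():
--         _RANK[_w] = _i
--
--
-- def classify_feature(feat: str) -> str:
--     best = 5
--     for tok in feat.lower().split():
--         r = _RANK.get(tok, 5)
--         if r < best:
--             best = r
--     return _BUCKETS[best] if best < 5 else "other"
-- ===== Notes on version B (the rewrite author's own statement) =====
-- stated objective: alternative
-- what changed: Replaces the five sequential any-membership scans over the word sets with a single left-to-right pass over the tokens that tracks the minimum priority rank via one precomputed word-to-rank dict, then maps that rank back to the bucket name.
import Mathlib
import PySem

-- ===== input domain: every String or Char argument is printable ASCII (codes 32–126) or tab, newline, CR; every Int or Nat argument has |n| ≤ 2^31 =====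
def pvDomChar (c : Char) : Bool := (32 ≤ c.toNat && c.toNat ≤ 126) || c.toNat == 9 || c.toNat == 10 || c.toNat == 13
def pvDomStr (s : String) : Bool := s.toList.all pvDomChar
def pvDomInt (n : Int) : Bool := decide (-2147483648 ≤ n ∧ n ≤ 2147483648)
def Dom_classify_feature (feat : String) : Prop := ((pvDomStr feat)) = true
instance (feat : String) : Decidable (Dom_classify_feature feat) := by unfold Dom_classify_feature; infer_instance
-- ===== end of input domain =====

set_option maxRecDepth 4000
set_option maxHeartbeats 1000000


-- B replaces A's five sequential any-scans of the word sets by one pass over the tokens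
-- that tracks the minimum priority rank through a precomputed word→rank index (alternative decomposition).

-- ===== PORT A =====
def pvColorWords : List String :=
  ["black", "white", "brown", "grey", "gray", "red", "yellow", "orange",
   "blue", "green", "golden", "silver", "cream", "beige", "chestnut",
   "tan", "buff", "rufous", "rusty", "pink", "purple"]
def pvPatternWords : List String :=
  ["striped", "spotted", "dotted", "banded", "barred", "streaked",
   "mottled", "speckled", "patched", "checked", "patterned", "ringed",
   "ring", "spot", "stripe", "band"]
def pvBodyWords : List String :=
  ["head", "beak", "bill", "eye", "eyes", "eyering", "eyebrow",
   "crown", "crest", "neck", "chest", "breast", "belly", "back",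
   "tail", "wing", "wings", "wingtips", "leg", "legs", "feet",
   "foot", "claw", "talon", "ear", "ears", "snout", "nose", "muzzle"]
def pvShapeWords : List String :=
  ["slender", "broad", "narrow", "long", "short", "rounded",
   "compact", "stocky", "tapered", "chunky", "elongated"]
def pvTextureWords : List String :=
  ["smooth", "rough", "glossy", "shiny", "matte", "fluffy",
   "shaggy", "fuzzy", "sleek", "plumage"]

-- any(c in tokens for c in WORDS): iteration order over the Python set cannot affect 'any'
def classify_feature (feat : String) : String :=
  let f := PySem.Str.lower feat
  let tokens : PySem.Set String := PySem.Set.ofList (PySem.Str.split₀ f)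
  if pvColorWords.any (fun c => PySem.Set.contains tokens c) then "color"
  else if pvPatternWords.any (fun p => PySem.Set.contains tokens p) then "pattern"
  else if pvBodyWords.any (fun b => PySem.Set.contains tokens b) then "body"
  else if pvShapeWords.any (fun s => PySem.Set.contains tokens s) then "shape"
  else if pvTextureWords.any (fun t => PySem.Set.contains tokens t) then "texture"
  else "other"

-- ===== PORT B =====
def pvBBuckets : List String := ["color", "pattern", "body", "shape", "texture"]

-- B's word data: one whitespace-separated string per priority group (split at build time)
def pvBGroups : List String :=
  ["black white brown grey gray red yellow orange blue green golden silver cream beige chestnut tan buff rufous rusty pink purple",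
   "striped spotted dotted banded barred streaked mottled speckled patched checked patterned ringed ring spot stripe band",
   "head beak bill eye eyes eyering eyebrow crown crest neck chest breast belly back tail wing wings wingtips leg legs feet foot claw talon ear ears snout nose muzzle",
   "slender broad narrow long short rounded compact stocky tapered chunky elongated",
   "smooth rough glossy shiny matte fluffy shaggy fuzzy sleek plumage"]

-- _RANK: the word→rank index, built by the enumerate loop of Source B
def pvBRank : PySem.Dict String Int :=
  (PySem.List.enumerate pvBGroups).foldl
    (fun d iw => (PySem.Str.split₀ iw.2).foldl (fun d w => d.insert w iw.1) d)
    PySem.Dict.empty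

def classify_feature_alt (feat : String) : String :=
  let best : Int := (PySem.Str.split₀ (PySem.Str.lower feat)).foldl
    (fun b tok => let r := pvBRank.getD tok 5; if r < b then r else b) 5
  if best < 5 then PySem.List.pyGetD pvBBuckets best "other" else "other"

-- ===== PRECONDITION & SPEC =====
def Spec_classify_feature (feat : String) (out : String) : Prop := out = classify_feature_alt feat
instance (feat : String) (out : String) : Decidable (Spec_classify_feature feat out) := by unfold Spec_classify_feature; infer_instance

-- ===== CLAIM =====
def Claim_equal_classify_feature : Prop := ∀ (feat : String), Dom_classify_feature feat → Spec_classify_feature feat (classify_feature feat)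

-- ===== LEMMAS AND PROOFS =====

def pvRankOf (t : String) : Int := pvBRank.getD t 5

theorem pvGet?_fold_insert (ws : List String) (b : Int) (d : PySem.Dict String Int) (t : String) :
    (ws.foldl (fun d w => d.insert w b) d).get? t = if t ∈ ws then some b else d.get? t := by
  induction ws generalizing d with
  | nil => simp
  | cons w rest ih =>
    simp only [List.foldl_cons, ih, PySem.Dict.get?_insert, List.mem_cons]
    by_cases h1 : t ∈ rest <;> by_cases h2 : t = w <;> simp [h1, h2]

theorem pvSplit0 : PySem.Str.split₀ (pvBGroups.getD 0 "") = pvColorWords := by decide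
theorem pvSplit1 : PySem.Str.split₀ (pvBGroups.getD 1 "") = pvPatternWords := by decide
theorem pvSplit2 : PySem.Str.split₀ (pvBGroups.getD 2 "") = pvBodyWords := by decide
theorem pvSplit3 : PySem.Str.split₀ (pvBGroups.getD 3 "") = pvShapeWords := by decide
theorem pvSplit4 : PySem.Str.split₀ (pvBGroups.getD 4 "") = pvTextureWords := by decide

theorem pvGet?_rank (t : String) :
    pvBRank.get? t =
      if t ∈ pvTextureWords then some 4
      else if t ∈ pvShapeWords then some 3
      else if t ∈ pvBodyWords then some 2
      else if t ∈ pvPatternWords then some 1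
      else if t ∈ pvColorWords then some 0
      else none := by
  have h : pvBRank =
      (PySem.Str.split₀ (pvBGroups.getD 4 "")).foldl (fun d w => d.insert w 4)
        ((PySem.Str.split₀ (pvBGroups.getD 3 "")).foldl (fun d w => d.insert w 3)
          ((PySem.Str.split₀ (pvBGroups.getD 2 "")).foldl (fun d w => d.insert w 2)
            ((PySem.Str.split₀ (pvBGroups.getD 1 "")).foldl (fun d w => d.insert w 1)
              ((PySem.Str.split₀ (pvBGroups.getD 0 "")).foldl (fun d w => d.insert w 0)
                PySem.Dict.empty)))) := by
    simp only [pvBRank, pvBGroups, PySem.List.enumerate_cons, PySem.List.enumerate_nil,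
      List.foldl_cons, List.foldl_nil, List.getD]
    norm_num
  rw [h, pvSplit0, pvSplit1, pvSplit2, pvSplit3, pvSplit4]
  simp only [pvGet?_fold_insert, PySem.Dict.get?_empty]

theorem pvDisj_color : ∀ t ∈ pvColorWords,
    t ∉ pvTextureWords ∧ t ∉ pvShapeWords ∧ t ∉ pvBodyWords ∧ t ∉ pvPatternWords := by decide
theorem pvDisj_pattern : ∀ t ∈ pvPatternWords,
    t ∉ pvTextureWords ∧ t ∉ pvShapeWords ∧ t ∉ pvBodyWords := by decide
theorem pvDisj_body : ∀ t ∈ pvBodyWords, t ∉ pvTextureWords ∧ t ∉ pvShapeWords := by decide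
theorem pvDisj_shape : ∀ t ∈ pvShapeWords, t ∉ pvTextureWords := by decide

theorem pvRankOf_bounds (t : String) : 0 ≤ pvRankOf t ∧ pvRankOf t ≤ 5 := by
  unfold pvRankOf
  rw [PySem.Dict.getD_eq_get?_getD, pvGet?_rank]
  split_ifs <;> simp

theorem pvRankOf_eq_zero (t : String) : pvRankOf t = 0 ↔ t ∈ pvColorWords := by
  unfold pvRankOf
  rw [PySem.Dict.getD_eq_get?_getD, pvGet?_rank]
  constructor
  · intro h; split_ifs at h <;> simp_all
  · intro h
    obtain ⟨h1, h2, h3, h4⟩ := pvDisj_color t h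
    simp [h, h1, h2, h3, h4]

theorem pvRankOf_eq_one (t : String) : pvRankOf t = 1 ↔ t ∈ pvPatternWords := by
  unfold pvRankOf
  rw [PySem.Dict.getD_eq_get?_getD, pvGet?_rank]
  constructor
  · intro h; split_ifs at h <;> simp_all
  · intro h
    obtain ⟨h1, h2, h3⟩ := pvDisj_pattern t h
    simp [h, h1, h2, h3]

theorem pvRankOf_eq_two (t : String) : pvRankOf t = 2 ↔ t ∈ pvBodyWords := by
  unfold pvRankOf
  rw [PySem.Dict.getD_eq_get?_getD, pvGet?_rank]
  constructor
  · intro h; split_ifs at h <;> simp_all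
  · intro h
    obtain ⟨h1, h2⟩ := pvDisj_body t h
    simp [h, h1, h2]

theorem pvRankOf_eq_three (t : String) : pvRankOf t = 3 ↔ t ∈ pvShapeWords := by
  unfold pvRankOf
  rw [PySem.Dict.getD_eq_get?_getD, pvGet?_rank]
  constructor
  · intro h; split_ifs at h <;> simp_all
  · intro h
    have h1 := pvDisj_shape t h
    simp [h, h1]

theorem pvRankOf_eq_four (t : String) : pvRankOf t = 4 ↔ t ∈ pvTextureWords := by
  unfold pvRankOf
  rw [PySem.Dict.getD_eq_get?_getD, pvGet?_rank]
  constructor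
  · intro h; split_ifs at h <;> simp_all
  · intro h; simp [h]

def pvMinStep (b : Int) (tok : String) : Int :=
  if pvBRank.getD tok 5 < b then pvBRank.getD tok 5 else b

theorem pvFold_le_init (toks : List String) (b : Int) : toks.foldl pvMinStep b ≤ b := by
  induction toks generalizing b with
  | nil => simp
  | cons t rest ih =>
    simp only [List.foldl_cons]
    refine le_trans (ih _) ?_
    unfold pvMinStep
    split_ifs with h <;> omega

theorem pvFold_le_mem (toks : List String) (b : Int) (t : String) (ht : t ∈ toks) :
    toks.foldl pvMinStep b ≤ pvRankOf t := by
  induction toks generalizing b with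
  | nil => simp at ht
  | cons u rest ih =>
    simp only [List.foldl_cons]
    rcases List.mem_cons.mp ht with h | h
    · subst h
      refine le_trans (pvFold_le_init _ _) ?_
      unfold pvMinStep pvRankOf
      split_ifs with hc <;> omega
    · exact ih _ h

theorem pvFold_attain (toks : List String) (b : Int) :
    toks.foldl pvMinStep b = b ∨ ∃ t ∈ toks, toks.foldl pvMinStep b = pvRankOf t := by
  induction toks generalizing b with
  | nil => simp
  | cons u rest ih =>
    simp only [List.foldl_cons]
    rcases ih (pvMinStep b u) with h | ⟨t, ht, h⟩
    · rw [h]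
      unfold pvMinStep
      split_ifs with hc
      · exact Or.inr ⟨u, List.mem_cons_self .., rfl⟩
      · exact Or.inl rfl
    · exact Or.inr ⟨t, List.mem_cons_of_mem _ ht, h⟩

theorem pvAny_eq (toks : List String) (ws : List String) (i : Int)
    (hch : ∀ t : String, pvRankOf t = i ↔ t ∈ ws) :
    ws.any (fun c => PySem.Set.contains (PySem.Set.ofList toks) c)
      = decide (∃ t ∈ toks, pvRankOf t = i) := by
  rw [Bool.eq_iff_iff]
  simp only [List.any_eq_true, PySem.Set.contains_iff, PySem.Set.mem_ofList, decide_eq_true_iff]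
  constructor
  · rintro ⟨c, hc, hct⟩; exact ⟨c, hct, (hch c).mpr hc⟩
  · rintro ⟨t, ht, hr⟩; exact ⟨t, (hch t).mp hr, ht⟩

theorem pvFold_char (toks : List String) :
    toks.foldl pvMinStep 5 =
      if ∃ t ∈ toks, pvRankOf t = 0 then 0
      else if ∃ t ∈ toks, pvRankOf t = 1 then 1
      else if ∃ t ∈ toks, pvRankOf t = 2 then 2
      else if ∃ t ∈ toks, pvRankOf t = 3 then 3
      else if ∃ t ∈ toks, pvRankOf t = 4 then 4
      else 5 := by
  have hatt := pvFold_attain toks 5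
  split_ifs with h0 h1 h2 h3 h4
  · obtain ⟨t, ht, hr⟩ := h0
    have hle := pvFold_le_mem toks 5 t ht
    rw [hr] at hle
    rcases hatt with h | ⟨u, _, h⟩
    · omega
    · have := (pvRankOf_bounds u).1; omega
  · obtain ⟨t, ht, hr⟩ := h1
    have hle := pvFold_le_mem toks 5 t ht
    rw [hr] at hle
    rcases hatt with h | ⟨u, hu, h⟩
    · omega
    · have hb := (pvRankOf_bounds u).1
      have hne : pvRankOf u ≠ 0 := fun hz => h0 ⟨u, hu, hz⟩
      omega
  · obtain ⟨t, ht, hr⟩ := h2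
    have hle := pvFold_le_mem toks 5 t ht
    rw [hr] at hle
    rcases hatt with h | ⟨u, hu, h⟩
    · omega
    · have hb := (pvRankOf_bounds u).1
      have hn0 : pvRankOf u ≠ 0 := fun hz => h0 ⟨u, hu, hz⟩
      have hn1 : pvRankOf u ≠ 1 := fun hz => h1 ⟨u, hu, hz⟩
      omega
  · obtain ⟨t, ht, hr⟩ := h3
    have hle := pvFold_le_mem toks 5 t ht
    rw [hr] at hle
    rcases hatt with h | ⟨u, hu, h⟩
    · omega
    · have hb := (pvRankOf_bounds u).1
      have hn0 : pvRankOf u ≠ 0 := fun hz => h0 ⟨u, hu, hz⟩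
      have hn1 : pvRankOf u ≠ 1 := fun hz => h1 ⟨u, hu, hz⟩
      have hn2 : pvRankOf u ≠ 2 := fun hz => h2 ⟨u, hu, hz⟩
      omega
  · obtain ⟨t, ht, hr⟩ := h4
    have hle := pvFold_le_mem toks 5 t ht
    rw [hr] at hle
    rcases hatt with h | ⟨u, hu, h⟩
    · omega
    · have hb := (pvRankOf_bounds u).1
      have hn0 : pvRankOf u ≠ 0 := fun hz => h0 ⟨u, hu, hz⟩
      have hn1 : pvRankOf u ≠ 1 := fun hz => h1 ⟨u, hu, hz⟩
      have hn2 : pvRankOf u ≠ 2 := fun hz => h2 ⟨u, hu, hz⟩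
      have hn3 : pvRankOf u ≠ 3 := fun hz => h3 ⟨u, hu, hz⟩
      omega
  · rcases hatt with h | ⟨u, hu, h⟩
    · exact h
    · have hb := (pvRankOf_bounds u).2
      have hb1 := (pvRankOf_bounds u).1
      have hn0 : pvRankOf u ≠ 0 := fun hz => h0 ⟨u, hu, hz⟩
      have hn1 : pvRankOf u ≠ 1 := fun hz => h1 ⟨u, hu, hz⟩
      have hn2 : pvRankOf u ≠ 2 := fun hz => h2 ⟨u, hu, hz⟩
      have hn3 : pvRankOf u ≠ 3 := fun hz => h3 ⟨u, hu, hz⟩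
      have hn4 : pvRankOf u ≠ 4 := fun hz => h4 ⟨u, hu, hz⟩
      omega

-- ===== VERDICT =====
theorem classify_feature_spec : Claim_equal_classify_feature := by
  intro feat _
  unfold Spec_classify_feature classify_feature classify_feature_alt
  simp only []
  set toks := PySem.Str.split₀ (PySem.Str.lower feat) with htoks
  have hfold : toks.foldl (fun b tok => let r := pvBRank.getD tok 5; if r < b then r else b) 5
      = toks.foldl pvMinStep 5 := rfl
  rw [hfold, pvFold_char,
      pvAny_eq toks pvColorWords 0 pvRankOf_eq_zero,
      pvAny_eq toks pvPatternWords 1 pvRankOf_eq_one,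
      pvAny_eq toks pvBodyWords 2 pvRankOf_eq_two,
      pvAny_eq toks pvShapeWords 3 pvRankOf_eq_three,
      pvAny_eq toks pvTextureWords 4 pvRankOf_eq_four]
  by_cases h0 : ∃ t ∈ toks, pvRankOf t = 0 <;>
    by_cases h1 : ∃ t ∈ toks, pvRankOf t = 1 <;>
      by_cases h2 : ∃ t ∈ toks, pvRankOf t = 2 <;>
        by_cases h3 : ∃ t ∈ toks, pvRankOf t = 3 <;>
          by_cases h4 : ∃ t ∈ toks, pvRankOf t = 4 <;>
            simp [h0, h1, h2, h3, h4] <;> decide
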